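-- pv_equiv track=rewrite | github.com/djcunningham0/2048_reinforcement_learning | rl_2048/game.py | _row_can_move_left
-- ===== SOURCE A (Python) =====
-- def _row_can_move_left(row: list[int]) -> bool:
--     """Check if sliding this row left would change it."""
--     seen_empty = False
--     for i in range(4):
--         if row[i] == 0:
--             seen_empty = True
--         else:
--             # A tile can move into an earlier empty space
--             if seen_empty:
--                 return True
--             # A tile can merge with the next non-zero tile
--             if i + 1 < 4 and row[i] == row[i + 1]:
--                 return True
--     return False
-- ===== SOURCE B (Python) =====
-- def _row_can_move_left(row: list[int]) -> bool:
--     """Check if sliding this row left would change it."""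
--     nz = [row[i] for i in range(4) if row[i] != 0]
--     return nz != row[:len(nz)] or any(a == b for a, b in zip(nz, nz[1:]))
-- ===== Notes on version B (the rewrite author's own statement) =====
-- stated objective: simpler
-- what changed: Replaced A's stateful seen_empty flag with early returns by a build-then-check decomposition: compact the nonzero tiles, then test prefix mismatch (a gap) or an adjacent equal pair (a merge).
-- outside the precondition, e.g. on _row_can_move_left([0, 1]): A returns True, B raises IndexError; on _row_can_move_left([0]): A raises IndexError, B raises IndexError
import Mathlib
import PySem

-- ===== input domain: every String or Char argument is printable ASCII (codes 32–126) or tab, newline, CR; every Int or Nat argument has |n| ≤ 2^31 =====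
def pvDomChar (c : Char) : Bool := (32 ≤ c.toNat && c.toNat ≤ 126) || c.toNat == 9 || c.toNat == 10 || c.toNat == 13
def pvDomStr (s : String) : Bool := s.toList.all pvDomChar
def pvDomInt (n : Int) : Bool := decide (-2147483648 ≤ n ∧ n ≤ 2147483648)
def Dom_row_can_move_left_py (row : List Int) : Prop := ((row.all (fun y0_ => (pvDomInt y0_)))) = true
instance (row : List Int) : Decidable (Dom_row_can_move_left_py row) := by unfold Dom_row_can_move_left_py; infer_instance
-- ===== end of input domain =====

-- B replaces A's stateful seen_empty/early-return scan by a build-then-check decomposition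
-- (compact the nonzero tiles, compare with the row prefix, test adjacent equal pairs); objective: simpler.

-- ===== PORT A =====
-- the 'for i in range(4)' loop with its early returns, as structural recursion over the index list [0,1,2,3]
def rowCanMoveLeftLoopA (row : List Int) (idxs : List Nat) (seenEmpty : Bool) : Bool :=
  match idxs with
  | [] => false
  | i :: rest =>
    match PySem.List.pyGet? row (Int.ofNat i) with
    | none => false  -- unreachable under Pre_ (Python raises IndexError here)
    | some v =>
      if v = 0 then rowCanMoveLeftLoopA row rest true
      else if seenEmpty then true
      else if i + 1 < 4 ∧ PySem.List.pyGet? row (Int.ofNat (i + 1)) = some v then true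
      else rowCanMoveLeftLoopA row rest seenEmpty

def row_can_move_left_py (row : List Int) : Bool :=
  rowCanMoveLeftLoopA row [0, 1, 2, 3] false

-- ===== PORT B =====
-- nz = [row[i] for i in range(4) if row[i] != 0]; return nz != row[:len(nz)] or any(a == b for a, b in zip(nz, nz[1:]))
def row_can_move_left_py_alt (row : List Int) : Bool :=
  let nz := ((List.range 4).filterMap (fun i => PySem.List.pyGet? row (Int.ofNat i))).filter
      (fun v => v ≠ 0)
  (nz != PySem.List.slice row none (some (Int.ofNat nz.length))) ||
    (nz.zip (nz.drop 1)).any (fun p => p.1 == p.2)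

-- ===== PRECONDITION & SPEC =====
-- Pre_ excludes rows shorter than 4: there A raises IndexError, except when an early return (an empty cell
-- followed by a nonzero tile) fires before the missing index, where A returns True while B still raises.
def Pre_row_can_move_left_py (row : List Int) : Prop := 4 ≤ row.length
instance (row : List Int) : Decidable (Pre_row_can_move_left_py row) := by
  unfold Pre_row_can_move_left_py; infer_instance
def pvWitness_row_can_move_left_py : List Int := [2, 0, 2, 4]

def Spec_row_can_move_left_py (row : List Int) (out : Bool) : Prop := out = row_can_move_left_py_alt row
instance (row : List Int) (out : Bool) : Decidable (Spec_row_can_move_left_py row out) := by unfold Spec_row_can_move_left_py; infer_instance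

-- ===== CLAIM (what is proved, stated in full; the proofs are below) =====
def Claim_equal_row_can_move_left_py : Prop := ∀ (row : List Int), Dom_row_can_move_left_py row → Pre_row_can_move_left_py row → Spec_row_can_move_left_py row (row_can_move_left_py row)

-- ===== LEMMAS AND PROOFS =====
set_option maxHeartbeats 1000000 in
theorem rowCanMoveLeft_cons_eq (a b c d : Int) (t : List Int) :
    row_can_move_left_py (a :: b :: c :: d :: t) = row_can_move_left_py_alt (a :: b :: c :: d :: t) := by
  have h1 : PySem.List.pyGet? (a :: b :: c :: d :: t) 1 = some b := by
    simp [PySem.List.pyGet?, PySem.List.pyIdx?]; rw [if_pos (by omega)]; rfl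
  have h2 : PySem.List.pyGet? (a :: b :: c :: d :: t) 2 = some c := by
    simp [PySem.List.pyGet?, PySem.List.pyIdx?]; rw [if_pos (by omega)]; rfl
  have h3 : PySem.List.pyGet? (a :: b :: c :: d :: t) 3 = some d := by
    simp [PySem.List.pyGet?, PySem.List.pyIdx?]; rw [if_pos (by omega)]; rfl
  simp only [row_can_move_left_py, row_can_move_left_py_alt, rowCanMoveLeftLoopA,
    List.range_succ, PySem.List.pyGet?_zero_cons, List.range_zero,
    List.nil_append, List.filterMap, Option.some.injEq]
  by_cases ha : a = 0 <;> by_cases hb : b = 0 <;> by_cases hc : c = 0 <;> by_cases hd : d = 0 <;>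
    by_cases hab : a = b <;> by_cases hbc : b = c <;> by_cases hcd : c = d <;>
    simp_all [PySem.List.slice_to, ne_comm, beq_iff_eq] <;>
    (rw [Bool.eq_iff_iff]; simp only [Bool.or_eq_true, decide_eq_true_eq, beq_iff_eq]; omega)

-- ===== VERDICT (by name: the statement is the Claim_ definition above) =====
theorem row_can_move_left_py_spec : Claim_equal_row_can_move_left_py := by
  intro row _ hpre
  unfold Spec_row_can_move_left_py
  match row, hpre with
  | a :: b :: c :: d :: t, _ => exact rowCanMoveLeft_cons_eq a b c d t
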